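-- pv_equiv track=rewrite | github.com/Swirl-String-Theory/Swirl-String-Theory | Saw-Shaped_Coil/Blender_SawShaped_cutout.py | coil_path_indices
-- ===== SOURCE A (Python) =====
-- S = 40
--
-- step_forward = 11
--
-- step_back = 9
--
-- n_segments = 40
--
-- def coil_path_indices(start_slot, n_seg=n_segments):
--     idx = start_slot
--     pts = [idx]
--     for k in range(n_seg):
--         if k % 2 == 0:
--             idx = (idx + step_forward) % S
--         else:
--             idx = (idx - step_back) % S
--         pts.append(idx)
--     return pts
-- ===== SOURCE B (Python) =====
-- S = 40
--
-- step_forward = 11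
--
-- step_back = 9
--
-- n_segments = 40
--
-- def coil_path_indices(start_slot, n_seg=n_segments):
--     # closed form: after m steps there were (m+1)//2 forward and m//2 back steps
--     return [start_slot] + [
--         (start_slot + ((m + 1) // 2) * step_forward - (m // 2) * step_back) % S
--         for m in range(1, n_seg + 1)
--     ]
-- ===== Notes on version B (the rewrite author's own statement) =====
-- stated objective: simpler
-- what changed: Replaces the stateful step-by-step loop with a closed-form comprehension computing each index directly from its position (forward/back step counts), with a single mod per element.
import Mathlib
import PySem

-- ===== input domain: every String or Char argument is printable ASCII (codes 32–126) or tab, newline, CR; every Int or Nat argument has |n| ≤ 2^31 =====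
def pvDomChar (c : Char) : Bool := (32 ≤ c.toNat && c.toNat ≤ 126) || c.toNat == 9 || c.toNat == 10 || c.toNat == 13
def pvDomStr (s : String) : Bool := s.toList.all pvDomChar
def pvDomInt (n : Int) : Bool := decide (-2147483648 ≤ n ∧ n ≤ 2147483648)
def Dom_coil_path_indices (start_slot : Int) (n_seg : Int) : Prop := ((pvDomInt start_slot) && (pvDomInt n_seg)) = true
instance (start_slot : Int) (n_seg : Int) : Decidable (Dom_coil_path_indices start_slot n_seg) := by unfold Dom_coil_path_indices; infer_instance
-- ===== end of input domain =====

-- B replaces A's stateful step-by-step loop by a closed-form expression per position (count of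
-- forward and back steps), a simpler decomposition of the same O(n) computation.

-- ===== PORT A =====
def coil_path_indices (start_slot : Int) (n_seg : Int) : List Int :=
  ((PySem.List.pyRange 0 n_seg 1).foldl
    (fun (st : Int × List Int) k =>
      let idx := if PySem.Int.mod k 2 = 0 then PySem.Int.mod (st.1 + 11) 40
                 else PySem.Int.mod (st.1 - 9) 40
      (idx, st.2 ++ [idx]))
    (start_slot, [start_slot])).2

-- ===== PORT B =====
-- closed form for the element at position m ≥ 1: (m+1)//2 forward steps of 11, m//2 back steps of 9
def coilElem (start_slot m : Int) : Int :=
  PySem.Int.mod (start_slot + PySem.Int.floordiv (m + 1) 2 * 11 - PySem.Int.floordiv m 2 * 9) 40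

def coil_path_indices_alt (start_slot : Int) (n_seg : Int) : List Int :=
  [start_slot] ++ (PySem.List.pyRange 1 (n_seg + 1) 1).map (coilElem start_slot)

-- ===== PRECONDITION & SPEC =====
def Spec_coil_path_indices (start_slot : Int) (n_seg : Int) (out : List Int) : Prop := out = coil_path_indices_alt start_slot n_seg
instance (start_slot : Int) (n_seg : Int) (out : List Int) : Decidable (Spec_coil_path_indices start_slot n_seg out) := by unfold Spec_coil_path_indices; infer_instance

-- ===== CLAIM (what is proved, stated in full; the proofs are below) =====
def Claim_equal_coil_path_indices : Prop := ∀ (start_slot : Int) (n_seg : Int), Dom_coil_path_indices start_slot n_seg → Spec_coil_path_indices start_slot n_seg (coil_path_indices start_slot n_seg)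

-- ===== LEMMAS AND PROOFS =====

-- the running index of A after n iterations
def natsTo (n : Nat) : List Int := (List.range n).map Int.ofNat

def coilTail (start_slot : Int) (n : Nat) : List Int :=
  (List.range n).map (fun k => coilElem start_slot (Int.ofNat k + 1))

def idxAfter (start_slot : Int) (n : Nat) : Int :=
  if n = 0 then start_slot else coilElem start_slot (n : Int)

theorem step_eq (start_slot : Int) (n : Nat) :
    (if PySem.Int.mod (n : Int) 2 = 0 then PySem.Int.mod (idxAfter start_slot n + 11) 40
     else PySem.Int.mod (idxAfter start_slot n - 9) 40)
    = coilElem start_slot ((n : Int) + 1) := by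
  have h2 : ∀ a : Int, PySem.Int.mod a 2 = a % 2 := fun a => PySem.Int.mod_eq_emod_of_pos (by norm_num)
  have h40 : ∀ a : Int, PySem.Int.mod a 40 = a % 40 := fun a => PySem.Int.mod_eq_emod_of_pos (by norm_num)
  have hd : ∀ a : Int, PySem.Int.floordiv a 2 = a / 2 := fun a => PySem.Int.floordiv_eq_ediv_of_pos (by norm_num)
  rcases Nat.eq_zero_or_pos n with hn | hn
  · subst hn
    simp only [idxAfter, coilElem, h2, h40, hd, Nat.cast_zero]
    norm_num
  · have hn0 : n ≠ 0 := by omega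
    simp only [idxAfter, coilElem, h2, h40, hd, if_neg hn0]
    have hcast : (0:Int) < (n:Int) := by exact_mod_cast hn
    split_ifs with h
    · omega
    · omega

theorem loopA (start_slot : Int) (n : Nat) :
    (natsTo n).foldl
      (fun (st : Int × List Int) k =>
        let idx := if PySem.Int.mod k 2 = 0 then PySem.Int.mod (st.1 + 11) 40
                   else PySem.Int.mod (st.1 - 9) 40
        (idx, st.2 ++ [idx]))
      (start_slot, [start_slot])
    = (idxAfter start_slot n, start_slot :: coilTail start_slot n) := by
  induction n with
  | zero => simp [natsTo, coilTail, idxAfter]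
  | succ n ih =>
    have hsplit : natsTo (n + 1) = natsTo n ++ [(n : Int)] := by
      simp [natsTo, List.range_succ]
    rw [hsplit, List.foldl_append, ih]
    simp only [List.foldl_cons, List.foldl_nil]
    have hs := step_eq start_slot n
    have htail : coilTail start_slot (n + 1) = coilTail start_slot n ++ [coilElem start_slot ((n : Int) + 1)] := by
      simp [coilTail, List.range_succ]
    rw [hs, htail]
    simp [idxAfter]

theorem pyRangeA (n_seg : Int) :
    PySem.List.pyRange 0 n_seg 1 = natsTo n_seg.toNat := by
  rw [PySem.List.pyRange_one]
  simp [natsTo, Int.ofNat_eq_natCast]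

theorem pyRangeB (start_slot n_seg : Int) :
    (PySem.List.pyRange 1 (n_seg + 1) 1).map (coilElem start_slot)
    = coilTail start_slot n_seg.toNat := by
  rw [PySem.List.pyRange_one]
  have h1 : (n_seg + 1 - 1).toNat = n_seg.toNat := by omega
  rw [h1, List.map_map]
  apply List.map_congr_left
  intro k _
  simp [Function.comp]
  ring_nf

-- ===== VERDICT (by name: the statement is the Claim_ definition above) =====
theorem coil_path_indices_spec : Claim_equal_coil_path_indices := by
  intro start_slot n_seg _
  show coil_path_indices start_slot n_seg = coil_path_indices_alt start_slot n_seg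
  unfold coil_path_indices coil_path_indices_alt
  rw [pyRangeA, loopA, pyRangeB]
  simp
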